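-- pv_equiv track=rewrite | github.com/Bruhtek/agh-wdi | zestawy/02 - tablice 1D/z79.py | exactly_one_min_max
-- ===== SOURCE A (Python) =====
-- def min_val(tab)->int:
--     min = tab[0]
--     for item in tab:
--        if item < min:
--            min = item
--     return min
--
-- def max_val(tab)->int:
--     max = tab[0]
--     for item in tab:
--         if item > max:
--             max = item
--     return max
--
-- def exactly_one_min_max(tab)->bool:
--     miniVal = min_val(tab)
--     maxiVal = max_val(tab)
--
--     mini_count = 0
--     maxi_count = 0
--     for item in tab:
--         if item == miniVal:
--             mini_count += 1
--         if item == maxiVal: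
--             maxi_count += 1
--     return mini_count == 1 and maxi_count == 1
-- ===== SOURCE B (Python) =====
-- def exactly_one_min_max(tab) -> bool:
--     # single pass: track running min/max and how often each current extreme occurred
--     cur_min = cur_max = tab[0]
--     min_count = max_count = 1
--     for item in tab[1:]:
--         if item < cur_min:
--             cur_min = item
--             min_count = 1
--         elif item == cur_min:
--             min_count += 1
--         if item > cur_max:
--             cur_max = item
--             max_count = 1
--         elif item == cur_max:
--             max_count += 1
--     return min_count == 1 and max_count == 1
-- ===== Notes on version B (the rewrite author's own statement) =====
-- stated objective: alternative
-- what changed: Replaces A's three separate passes (min scan, max scan, counting scan) by one pass that maintains running min/max with reset-on-new-extreme occurrence counters.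
import Mathlib
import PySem

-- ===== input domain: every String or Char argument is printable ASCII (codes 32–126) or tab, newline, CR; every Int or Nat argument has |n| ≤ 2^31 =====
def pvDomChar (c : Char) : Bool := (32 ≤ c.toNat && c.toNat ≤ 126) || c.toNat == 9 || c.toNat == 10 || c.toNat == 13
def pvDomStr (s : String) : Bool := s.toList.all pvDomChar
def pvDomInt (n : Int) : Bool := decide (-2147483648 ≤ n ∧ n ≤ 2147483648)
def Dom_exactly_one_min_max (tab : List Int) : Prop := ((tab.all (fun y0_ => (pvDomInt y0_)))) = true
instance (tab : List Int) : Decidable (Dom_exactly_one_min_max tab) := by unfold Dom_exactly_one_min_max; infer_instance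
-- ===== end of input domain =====

-- B restructures A's three passes (min scan, max scan, counting scan) into one pass that
-- maintains running min/max with reset-on-new-extreme counters (objective: alternative, same cost);
-- equivalence proved on nonempty lists (A raises IndexError on []).


-- ===== PORT A =====
-- tab[0] is ported as tab.headD 0; Pre_ excludes the empty list, where Python raises IndexError.
def min_val (tab : List Int) : Int :=
  tab.foldl (fun m item => if item < m then item else m) (tab.headD 0)

def max_val (tab : List Int) : Int :=
  tab.foldl (fun m item => if item > m then item else m) (tab.headD 0)

def exactly_one_min_max (tab : List Int) : Bool :=
  let miniVal := min_val tab
  let maxiVal := max_val tab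
  let counts := tab.foldl
    (fun (c : Int × Int) item =>
      (if item = miniVal then c.1 + 1 else c.1,
       if item = maxiVal then c.2 + 1 else c.2)) (0, 0)
  decide (counts.1 = 1) && decide (counts.2 = 1)

-- ===== PORT B =====
-- the single loop over tab[1:], state = (cur_min, min_count, cur_max, max_count)
def pvLoopB : List Int → Int → Int → Int → Int → Int × Int × Int × Int
  | [], mn, mc, mx, xc => (mn, mc, mx, xc)
  | item :: t, mn, mc, mx, xc =>
    let p1 : Int × Int :=
      if item < mn then (item, 1) else if item = mn then (mn, mc + 1) else (mn, mc)
    let p2 : Int × Int :=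
      if item > mx then (item, 1) else if item = mx then (mx, xc + 1) else (mx, xc)
    pvLoopB t p1.1 p1.2 p2.1 p2.2

def exactly_one_min_max_alt (tab : List Int) : Bool :=
  match tab with
  | [] => false   -- unreachable under Pre_: Python B raises IndexError here
  | x :: xs =>
    let r := pvLoopB xs x 1 x 1
    decide (r.2.1 = 1) && decide (r.2.2.2 = 1)

-- ===== PRECONDITION & SPEC =====
-- Pre_ excludes exactly the empty list, on which Python A raises IndexError.
def Pre_exactly_one_min_max (tab : List Int) : Prop := tab ≠ []
instance (tab : List Int) : Decidable (Pre_exactly_one_min_max tab) := by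
  unfold Pre_exactly_one_min_max; infer_instance
def pvWitness_exactly_one_min_max : List Int := [3, 1, 2]

def Spec_exactly_one_min_max (tab : List Int) (out : Bool) : Prop := out = exactly_one_min_max_alt tab
instance (tab : List Int) (out : Bool) : Decidable (Spec_exactly_one_min_max tab out) := by unfold Spec_exactly_one_min_max; infer_instance

-- ===== CLAIM (what is proved, stated in full; the proofs are below) =====
def Claim_equal_exactly_one_min_max : Prop := ∀ (tab : List Int), Dom_exactly_one_min_max tab → Pre_exactly_one_min_max tab → Spec_exactly_one_min_max tab (exactly_one_min_max tab)

-- ===== LEMMAS AND PROOFS =====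

-- the running-min / running-max folds shared (in spirit) by both programs
def pvM (xs : List Int) (a : Int) : Int :=
  xs.foldl (fun m item => if item < m then item else m) a
def pvMX (xs : List Int) (a : Int) : Int :=
  xs.foldl (fun m item => if item > m then item else m) a

lemma pvM_le : ∀ (xs : List Int) (a : Int), pvM xs a ≤ a := by
  intro xs
  induction xs with
  | nil => intro a; simp [pvM]
  | cons i t ih =>
    intro a
    simp only [pvM, List.foldl_cons]
    split_ifs with h
    · exact le_trans (ih i) (le_of_lt h)
    · exact ih a

lemma pvMX_ge : ∀ (xs : List Int) (a : Int), a ≤ pvMX xs a := by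
  intro xs
  induction xs with
  | nil => intro a; simp [pvMX]
  | cons i t ih =>
    intro a
    simp only [pvMX, List.foldl_cons]
    split_ifs with h
    · exact le_trans (le_of_lt h) (ih i)
    · exact ih a

lemma pvM_cons (i : Int) (t : List Int) (a : Int) :
    pvM (i :: t) a = pvM t (if i < a then i else a) := by simp [pvM]

lemma pvMX_cons (i : Int) (t : List Int) (a : Int) :
    pvMX (i :: t) a = pvMX t (if i > a then i else a) := by simp [pvMX]

lemma pvLoopB_spec : ∀ (xs : List Int) (mn mc mx xc : Int),
    pvLoopB xs mn mc mx xc =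
      (pvM xs mn,
       (xs.count (pvM xs mn) : Int) + (if mn = pvM xs mn then mc else 0),
       pvMX xs mx,
       (xs.count (pvMX xs mx) : Int) + (if mx = pvMX xs mx then xc else 0)) := by
  intro xs
  induction xs with
  | nil => intro mn mc mx xc; simp [pvLoopB, pvM, pvMX]
  | cons i t ih =>
    intro mn mc mx xc
    have a1 := pvM_le t i
    have a2 := pvM_le t mn
    have a3 := pvMX_ge t i
    have a4 := pvMX_ge t mx
    simp only [pvLoopB]
    rw [ih, pvM_cons, pvMX_cons]
    simp only [Prod.mk.injEq, List.count_cons, beq_iff_eq]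
    split_ifs <;> (dsimp only at *; push_cast at *; omega)

lemma countfold : ∀ (l : List Int) (mn mx a b : Int),
    l.foldl (fun (c : Int × Int) item =>
      (if item = mn then c.1 + 1 else c.1,
       if item = mx then c.2 + 1 else c.2)) (a, b)
    = (a + (l.count mn : Int), b + (l.count mx : Int)) := by
  intro l
  induction l with
  | nil => intro mn mx a b; simp
  | cons i t ih =>
    intro mn mx a b
    simp only [List.foldl_cons]
    rw [ih]
    simp only [Prod.mk.injEq, List.count_cons, beq_iff_eq]
    refine ⟨?_, ?_⟩ <;> split_ifs <;> (push_cast; omega)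

-- ===== VERDICT (by name: the statement is the Claim_ definition above) =====
theorem exactly_one_min_max_spec : Claim_equal_exactly_one_min_max := by
  intro tab _ hpre
  unfold Spec_exactly_one_min_max
  match tab with
  | [] => exact absurd rfl hpre
  | x :: xs =>
    have hmin : min_val (x :: xs) = pvM xs x := by simp [min_val, pvM]
    have hmax : max_val (x :: xs) = pvMX xs x := by simp [max_val, pvMX]
    have e1 : (((x :: xs).count (pvM xs x) : Int))
        = (xs.count (pvM xs x) : Int) + (if x = pvM xs x then 1 else 0) := by
      simp only [List.count_cons, beq_iff_eq]
      split_ifs <;> (push_cast; omega)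
    have e2 : (((x :: xs).count (pvMX xs x) : Int))
        = (xs.count (pvMX xs x) : Int) + (if x = pvMX xs x then 1 else 0) := by
      simp only [List.count_cons, beq_iff_eq]
      split_ifs <;> (push_cast; omega)
    simp only [exactly_one_min_max, exactly_one_min_max_alt, hmin, hmax,
      countfold, pvLoopB_spec, zero_add, e1, e2]
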